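-- pv_equiv track=rewrite | github.com/kyriekevin/leetcode | code/3132/3132.找出与数组相加的整数-ii.py | minimumAddedInteger
-- ===== SOURCE A (Python) =====
-- from typing import List
--
-- def minimumAddedInteger(nums1: List[int], nums2: List[int]) -> int:
--     nums1.sort()
--     nums2.sort()
--
--     for i in range(2, 0, -1):
--         x = nums2[0] - nums1[i]
--         j = 0
--         for v in nums1[i:]:
--             if v + x == nums2[j]:
--                 j += 1
--                 if j == len(nums2):
--                     return x
--     return nums2[0] - nums1[0]
-- ===== SOURCE B (Python) =====
-- from typing import List
-- from collections import Counter
--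
-- def minimumAddedInteger(nums1: List[int], nums2: List[int]) -> int:
--     nums1.sort()
--     nums2.sort()
--     need = Counter(nums2)
--     for i in (2, 1):
--         x = nums2[0] - nums1[i]
--         avail = Counter(nums1[i:])
--         if all(c <= avail[w - x] for w, c in need.items()):
--             return x
--     return nums2[0] - nums1[0]
-- ===== Notes on version B (the rewrite author's own statement) =====
-- stated objective: alternative
-- what changed: A's index-walking greedy subsequence scan over nums1[i:] is replaced by a Counter-based multiset-inclusion test (every needed value present with sufficient count), keeping the i=2-then-i=1 candidate order and the unchecked i=0 fallback.
import Mathlib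
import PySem

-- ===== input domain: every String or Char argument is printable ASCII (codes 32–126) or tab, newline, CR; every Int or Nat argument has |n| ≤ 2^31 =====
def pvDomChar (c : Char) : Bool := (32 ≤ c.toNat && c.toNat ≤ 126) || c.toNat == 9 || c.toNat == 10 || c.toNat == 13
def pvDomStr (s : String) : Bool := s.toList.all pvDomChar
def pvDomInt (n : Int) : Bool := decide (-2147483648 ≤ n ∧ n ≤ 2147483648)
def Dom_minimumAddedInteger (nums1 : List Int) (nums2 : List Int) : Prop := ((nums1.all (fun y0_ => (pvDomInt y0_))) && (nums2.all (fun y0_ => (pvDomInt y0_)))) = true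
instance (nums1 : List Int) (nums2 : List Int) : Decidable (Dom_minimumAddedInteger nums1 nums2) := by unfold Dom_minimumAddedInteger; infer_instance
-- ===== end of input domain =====

-- B replaces A's index-walking greedy subsequence scan by a multiset (Counter)
-- sub-inclusion test; same candidate order, same unchecked fallback (objective:
-- alternative). Equivalence is about return values; both Pythons sort the two
-- argument lists in place, as A does.

-- ===== PORT A =====
-- A's inner loop: walk nums1[i:], advance j on a match with nums2[j]; return
-- True (Python: return x) when j reaches len(nums2).  Inside Pre_ the access
-- nums2[j] always has j < len(nums2) (the loop returns right after j hits len),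
-- so pyGetD with default 0 is exact there.
def aScan (n2 : List Int) (x : Int) : List Int → Nat → Bool
  | [], _ => false
  | v :: rest, j =>
    if v + x = PySem.List.pyGetD n2 (j : Int) 0 then
      if j + 1 = n2.length then true else aScan n2 x rest (j + 1)
    else aScan n2 x rest j

def minimumAddedInteger (nums1 : List Int) (nums2 : List Int) : Int :=
  let s1 := PySem.List.sorted nums1 (fun v => v) false
  let s2 := PySem.List.sorted nums2 (fun v => v) false
  let h := PySem.List.pyGetD s2 0 0
  let x2 := h - PySem.List.pyGetD s1 2 0
  if aScan s2 x2 (s1.drop 2) 0 then x2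
  else
    let x1 := h - PySem.List.pyGetD s1 1 0
    if aScan s2 x1 (s1.drop 1) 0 then x1
    else h - PySem.List.pyGetD s1 0 0

-- ===== PORT B =====
-- Source B: need = Counter(nums2); Counter(xs)[k] = xs.count k; need.items()
-- iterates the distinct values of s2 (PySem.Set.ofList s2) with their counts.
def bFits (avail : List Int) (keys : List Int) (s2 : List Int) (x : Int) : Bool :=
  keys.all (fun w => s2.count w ≤ avail.count (w - x))

def minimumAddedInteger_alt (nums1 : List Int) (nums2 : List Int) : Int :=
  let s1 := PySem.List.sorted nums1 (fun v => v) false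
  let s2 := PySem.List.sorted nums2 (fun v => v) false
  let keys := PySem.Set.ofList s2
  let h := PySem.List.pyGetD s2 0 0
  let x2 := h - PySem.List.pyGetD s1 2 0
  if bFits (s1.drop 2) keys s2 x2 then x2
  else
    let x1 := h - PySem.List.pyGetD s1 1 0
    if bFits (s1.drop 1) keys s2 x1 then x1
    else h - PySem.List.pyGetD s1 0 0

-- ===== PRECONDITION & SPEC =====
-- A raises IndexError (nums1[2] or nums2[0]) exactly when nums1 has fewer than
-- 3 elements or nums2 is empty; those inputs are excluded.
def Pre_minimumAddedInteger (nums1 : List Int) (nums2 : List Int) : Prop :=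
  3 ≤ nums1.length ∧ nums2 ≠ []
instance (nums1 : List Int) (nums2 : List Int) : Decidable (Pre_minimumAddedInteger nums1 nums2) := by
  unfold Pre_minimumAddedInteger; infer_instance

def pvWitness_minimumAddedInteger : List Int × List Int := ([4, 6, 3, 1, 10], [7, 4, 1])

def Spec_minimumAddedInteger (nums1 : List Int) (nums2 : List Int) (out : Int) : Prop := out = minimumAddedInteger_alt nums1 nums2
instance (nums1 : List Int) (nums2 : List Int) (out : Int) : Decidable (Spec_minimumAddedInteger nums1 nums2 out) := by unfold Spec_minimumAddedInteger; infer_instance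

-- ===== CLAIM (what is proved, stated in full; the proofs are below) =====
def Claim_equal_minimumAddedInteger : Prop := ∀ (nums1 : List Int) (nums2 : List Int), Dom_minimumAddedInteger nums1 nums2 → Pre_minimumAddedInteger nums1 nums2 → Spec_minimumAddedInteger nums1 nums2 (minimumAddedInteger nums1 nums2)

-- ===== LEMMAS AND PROOFS =====

-- Heads differ: a sublist starting at a ≠ b must embed past the head b.
theorem cons_sublist_of_ne {a b : Int} {l1 l2 : List Int}
    (h : List.Sublist (a :: l1) (b :: l2)) (hne : a ≠ b) : List.Sublist (a :: l1) l2 := by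
  cases h with
  | cons _ h' => exact h'
  | cons₂ _ _ => exact absurd rfl hne

-- A's greedy scan decides "the unmatched tail of n2 is a sublist of l shifted by x".
theorem aScan_eq_sublist (n2 : List Int) (x : Int) (l : List Int) (j : Nat)
    (hj : j < n2.length) :
    aScan n2 x l j = decide (List.Sublist (n2.drop j) (l.map (fun v => v + x))) := by
  induction l generalizing j with
  | nil =>
    have hne : n2.drop j ≠ [] := by
      simp [List.drop_eq_nil_iff]; omega
    simp [aScan, List.sublist_nil, hne]
  | cons v rest ih =>
    have hdrop : n2.drop j = n2[j] :: n2.drop (j + 1) := List.drop_eq_getElem_cons hj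
    have hget : PySem.List.pyGetD n2 (j : Int) 0 = n2[j] := by
      simp [PySem.List.pyGetD, PySem.List.pyGet?, PySem.List.pyIdx?, hj]
    by_cases hv : v + x = n2[j]
    · by_cases hlast : j + 1 = n2.length
      · have hnil : n2.drop (j + 1) = [] := by simp [hlast]
        simp only [aScan, hget, if_pos hlast, List.map_cons, hv]
        rw [hdrop, hnil]
        exact (decide_eq_true (List.cons_sublist_cons.mpr (List.nil_sublist _))).symm
      · have hj1 : j + 1 < n2.length := by omega
        simp only [aScan, hget, if_neg hlast, List.map_cons, hv]
        rw [ih (j + 1) hj1, hdrop]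
        exact (decide_eq_decide.mpr List.cons_sublist_cons).symm
    · simp only [aScan, hget, if_neg hv, List.map_cons]
      rw [ih j hj]
      have hiff : List.Sublist (n2[j] :: n2.drop (j + 1)) (rest.map (fun v => v + x)) ↔
          List.Sublist (n2[j] :: n2.drop (j + 1)) ((v + x) :: rest.map (fun v => v + x)) := by
        constructor
        · intro h; exact h.cons _
        · intro h; exact cons_sublist_of_ne h (fun he => hv he.symm)
      rw [hdrop]
      exact decide_eq_decide.mpr hiff

-- For sorted lists, sublist coincides with multiset inclusion, i.e. counts.
theorem sublist_iff_counts (l1 l2 : List Int)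
    (h1 : l1.Pairwise (· ≤ ·)) (h2 : l2.Pairwise (· ≤ ·)) :
    (List.Sublist l1 l2) ↔ ∀ w ∈ l1, l1.count w ≤ l2.count w := by
  constructor
  · intro h w _; exact h.subperm.count_le w
  · intro h
    exact List.sublist_of_subperm_of_pairwise (List.subperm_ext_iff.mpr h) h1 h2

theorem count_map_add (l : List Int) (x w : Int) :
    (l.map (fun v => v + x)).count w = l.count (w - x) := by
  have : w = (w - x) + x := by ring
  rw [this, List.count_map_of_injective l (fun v => v + x) (add_left_injective x)]
  ring_nf

-- A's scan from j = 0 equals B's Counter test, for sorted s2 ≠ [] and sorted l.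
theorem scan_eq_fits (s2 l : List Int) (x : Int)
    (hne : s2 ≠ []) (hs2 : s2.Pairwise (· ≤ ·)) (hl : l.Pairwise (· ≤ ·)) :
    aScan s2 x l 0 = bFits l (PySem.Set.ofList s2) s2 x := by
  have h0 : 0 < s2.length := List.length_pos_iff.mpr hne
  have hlm : (l.map (fun v => v + x)).Pairwise (· ≤ ·) := by
    rw [List.pairwise_map]
    exact hl.imp (fun {a b} h => by omega)
  rw [aScan_eq_sublist s2 x l 0 h0, List.drop_zero, Bool.eq_iff_iff,
    decide_eq_true_iff, sublist_iff_counts _ _ hs2 hlm]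
  unfold bFits
  rw [List.all_eq_true]
  constructor
  · intro h w hw
    have hw' : w ∈ s2 := (PySem.Set.mem_ofList _ _).mp hw
    simpa [count_map_add] using h w hw'
  · intro h w hw
    have := h w ((PySem.Set.mem_ofList _ _).mpr hw)
    rw [count_map_add]
    simpa using this

theorem sorted_pw (xs : List Int) :
    (PySem.List.sorted xs (fun v => v) false).Pairwise (· ≤ ·) :=
  PySem.List.sorted_pairwise xs (fun v => v)

-- ===== VERDICT (by name: the statement is the Claim_ definition above) =====
theorem minimumAddedInteger_spec : Claim_equal_minimumAddedInteger := by
  intro nums1 nums2 _ hpre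
  unfold Spec_minimumAddedInteger minimumAddedInteger minimumAddedInteger_alt
  obtain ⟨h1, h2⟩ := hpre
  have hs2ne : PySem.List.sorted nums2 (fun v => v) false ≠ [] := by
    simpa [PySem.List.sorted_eq_nil_iff] using h2
  have hs2 := sorted_pw nums2
  have hdrop : ∀ i : Nat,
      ((PySem.List.sorted nums1 (fun v => v) false).drop i).Pairwise (· ≤ ·) :=
    fun i => (sorted_pw nums1).sublist (List.drop_sublist i _)
  simp only [scan_eq_fits _ _ _ hs2ne hs2 (hdrop 2), scan_eq_fits _ _ _ hs2ne hs2 (hdrop 1)]
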